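-- pv_equiv track=rewrite | github.com/dcycle/docker-translator | docker-resources/utilities.py | preserve_quoted_dict_items
-- ===== SOURCE A (Python) =====
-- def is_quoted(value, key, lines):
--     """Check if a given key's value is quoted in the raw YAML lines."""
--     for line in lines:
--         if line.strip().startswith(f"{key}:"):
--             _, val_part = line.split(":", 1)
--             val_part = val_part.strip()
--             return val_part.startswith('"') and val_part.endswith('"')
--     return False
--
-- def preserve_quoted_dict_items(item_dict, lines):
--     """Preserve quotes for dictionary items inside a list."""
--     result = {}
--     for key, value in item_dict.items():
--         if is_quoted(value, key, lines):
--             result[key] = f'"{value}"'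
--         else:
--             result[key] = value
--     return result
-- ===== SOURCE B (Python) =====
-- def preserve_quoted_dict_items(item_dict, lines):
--     """Preserve quotes for dictionary items inside a list."""
--     result = dict(item_dict)
--     seen = set()
--     for line in lines:
--         stripped = line.strip()
--         if ':' not in stripped:
--             continue
--         key = stripped.split(':', 1)[0]
--         if key in result and key not in seen:
--             seen.add(key)
--             val = line.split(':', 1)[1].strip()
--             if val.startswith('"') and val.endswith('"'):
--                 result[key] = f'"{result[key]}"'
--     return result
-- ===== Notes on version B (the rewrite author's own statement) =====
-- stated objective: faster
-- what changed: A rescans the whole line list once per dict key (is_quoted inside the loop over items); B copies the dict once and makes a single pass over the lines, parsing each line's key at its first colon and deciding each key at its first matching line via a seen-set. Pre_ excludes inputs where a dict key containing ':' prefixes some line as 'key:', where the key/value colon is ambiguous and A's startswith match (which still reads the value from the first colon, inside the key) and B's first-colon key parse are both defensible readings.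
-- outside the precondition, e.g. on preserve_quoted_dict_items({'a:"b"': 'v'}, ['a:"b": "x"']): A returns {'a:"b"': '"v"'}, B returns {'a:"b"': 'v'}
import Mathlib
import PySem

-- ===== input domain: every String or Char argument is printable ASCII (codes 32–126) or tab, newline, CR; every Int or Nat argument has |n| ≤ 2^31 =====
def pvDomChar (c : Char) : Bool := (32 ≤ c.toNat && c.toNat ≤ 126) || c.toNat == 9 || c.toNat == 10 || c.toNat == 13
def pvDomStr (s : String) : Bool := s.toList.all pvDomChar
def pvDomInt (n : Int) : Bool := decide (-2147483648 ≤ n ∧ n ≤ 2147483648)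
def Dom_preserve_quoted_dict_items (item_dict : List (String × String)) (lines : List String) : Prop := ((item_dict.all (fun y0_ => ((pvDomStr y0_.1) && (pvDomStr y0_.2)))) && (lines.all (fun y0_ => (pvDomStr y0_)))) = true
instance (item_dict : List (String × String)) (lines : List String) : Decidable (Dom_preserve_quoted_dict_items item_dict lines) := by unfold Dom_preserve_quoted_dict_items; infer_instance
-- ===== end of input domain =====

-- B replaces A's per-key rescan of all lines (is_quoted called once per dict key) by a single
-- pass over the lines maintaining the result dict and a 'seen' set of already-decided keys.

-- ===== PORT A =====
-- port of A's helper is_quoted: scan lines for the first one whose stripped form starts with "key:"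
def pqIsQuoted (value key : String) (lines : List String) : Bool :=
  match lines with
  | [] => false
  | line :: rest =>
    if PySem.Str.startswith (PySem.Str.strip line) (key ++ ":") then
      -- _, val_part = line.split(":", 1); val_part = val_part.strip()
      let valPart := PySem.Str.strip (((PySem.Str.splitMax? line ":" 1).getD []).getD 1 "")
      PySem.Str.startswith valPart "\"" && PySem.Str.endswith valPart "\""
    else pqIsQuoted value key rest

def preserve_quoted_dict_items (item_dict : List (String × String)) (lines : List String) : List (String × String) :=
  ((PySem.Dict.ofList item_dict).items.foldl
    (fun result kv =>
      if pqIsQuoted kv.2 kv.1 lines then result.insert kv.1 ("\"" ++ kv.2 ++ "\"")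
      else result.insert kv.1 kv.2)
    PySem.Dict.empty).items

-- ===== PORT B =====
-- one iteration of B's 'for line in lines' loop; state = (result, seen)
def pqBStep (st : PySem.Dict String String × PySem.Set String) (line : String) :
    PySem.Dict String String × PySem.Set String :=
  let stripped := PySem.Str.strip line
  if PySem.Str.isIn ":" stripped then
    let key := ((PySem.Str.splitMax? stripped ":" 1).getD []).getD 0 ""
    if st.1.contains key && !(PySem.Set.contains st.2 key) then
      let seen := PySem.Set.add st.2 key
      let val := PySem.Str.strip (((PySem.Str.splitMax? line ":" 1).getD []).getD 1 "")
      if PySem.Str.startswith val "\"" && PySem.Str.endswith val "\"" then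
        (st.1.modify key "" (fun v => "\"" ++ v ++ "\""), seen)
      else (st.1, seen)
    else st
  else st

def preserve_quoted_dict_items_alt (item_dict : List (String × String)) (lines : List String) : List (String × String) :=
  (lines.foldl pqBStep (PySem.Dict.ofList item_dict, PySem.Set.empty)).1.items

-- ===== PRECONDITION & SPEC =====
-- Pre_ excludes inputs where a dict key containing ':' prefixes some YAML line ("key:"): on
-- such a key the colon separating key from value is ambiguous, and A's startswith-match (which
-- still reads the value part from the FIRST colon, i.e. from inside the key) and B's first-colon
-- key parse are two defensible readings of the same unspecified corner.
def Pre_preserve_quoted_dict_items (item_dict : List (String × String)) (lines : List String) : Prop :=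
  ∀ p ∈ item_dict, (':' : Char) ∈ p.1.toList →
    ∀ line ∈ lines, ¬ (PySem.Str.startswith (PySem.Str.strip line) (p.1 ++ ":") = true)
instance (item_dict : List (String × String)) (lines : List String) : Decidable (Pre_preserve_quoted_dict_items item_dict lines) := by unfold Pre_preserve_quoted_dict_items; infer_instance

def pvWitness_preserve_quoted_dict_items : (List (String × String)) × List String :=
  ([("name", "x")], ["name: \"x\""])

def Spec_preserve_quoted_dict_items (item_dict : List (String × String)) (lines : List String) (out : List (String × String)) : Prop := out = preserve_quoted_dict_items_alt item_dict lines
instance (item_dict : List (String × String)) (lines : List String) (out : List (String × String)) : Decidable (Spec_preserve_quoted_dict_items item_dict lines out) := by unfold Spec_preserve_quoted_dict_items; infer_instance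

-- ===== CLAIM (what is proved, stated in full; the proofs are below) =====
def Claim_equal_preserve_quoted_dict_items : Prop := ∀ (item_dict : List (String × String)) (lines : List String), Dom_preserve_quoted_dict_items item_dict lines → Pre_preserve_quoted_dict_items item_dict lines → Spec_preserve_quoted_dict_items item_dict lines (preserve_quoted_dict_items item_dict lines)

-- ===== LEMMAS AND PROOFS =====

-- does line (after stripping) start with "key:" — A's match condition
def pqMatches (key line : String) : Bool :=
  PySem.Str.startswith (PySem.Str.strip line) (key ++ ":")

-- quotedness of a line's value part (what both ports compute from line.split(":",1)[1])
def pqQOf (line : String) : Bool :=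
  let valPart := PySem.Str.strip (((PySem.Str.splitMax? line ":" 1).getD []).getD 1 "")
  PySem.Str.startswith valPart "\"" && PySem.Str.endswith valPart "\""

-- quotedness of the first matching line, if any
def pqFM (key : String) (lines : List String) : Option Bool :=
  match lines with
  | [] => none
  | line :: rest => if pqMatches key line then some (pqQOf line) else pqFM key rest

theorem pqIsQuoted_eq_fm (v k : String) (lines : List String) :
    pqIsQuoted v k lines = (pqFM k lines).getD false := by
  induction lines with
  | nil => rfl
  | cons line rest ih =>
    rw [pqIsQuoted, pqFM]
    by_cases hm : pqMatches k line = true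
    · rw [if_pos hm, if_pos (show PySem.Str.startswith (PySem.Str.strip line) (k ++ ":") = true from hm)]
      simp only [Option.getD_some, pqQOf]
    · rw [if_neg hm, if_neg (show ¬ PySem.Str.startswith (PySem.Str.strip line) (k ++ ":") = true from hm)]
      exact ih

theorem pq_matches_isIn {k line : String} (h : pqMatches k line = true) :
    PySem.Str.isIn ":" (PySem.Str.strip line) = true := by
  have h' : (k.toList ++ [':']) <+: (PySem.Str.strip line).toList := by
    simpa [pqMatches, PySem.Chars.startswith_iff] using h
  have : [':'] <:+: (PySem.Str.strip line).toList := by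
    rcases h' with ⟨t, ht⟩
    exact ⟨k.toList, t, by simpa using ht⟩
  simpa [PySem.Str.isIn_eq, PySem.Chars.isIn_iff_infix] using this

theorem pq_takeWhile_colon (ks t : List Char) (h : (':' : Char) ∉ ks) :
    (ks ++ ':' :: t).takeWhile (· ≠ ':') = ks ∧ (ks ++ ':' :: t).dropWhile (· ≠ ':') = ':' :: t := by
  induction ks with
  | nil => simp [List.takeWhile, List.dropWhile]
  | cons c cs ih =>
    have hc : c ≠ ':' := by intro hh; exact h (by simp [hh])
    have hb : (fun x => decide (x ≠ ':')) c = true := by simp [hc]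
    obtain ⟨h1, h2⟩ := ih (fun hm => h (by simp [hm]))
    refine ⟨?_, ?_⟩
    · rw [List.cons_append, List.takeWhile_cons, if_pos hb, h1]
    · rw [List.cons_append, List.dropWhile_cons, if_pos hb, h2]

theorem pq_go_zero (fuel : Nat) (l cur : List Char) (accs : List (List Char)) :
    PySem.Chars.splitOnMax.go [':'] fuel 0 l cur accs = ((cur.reverse ++ l) :: accs).reverse := by
  cases fuel <;> cases l <;> simp [PySem.Chars.splitOnMax.go]

theorem pq_go_one (l : List Char) : ∀ (fuel : Nat), l.length < fuel → ∀ (cur : List Char) (accs : List (List Char)),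
    PySem.Chars.splitOnMax.go [':'] fuel 1 l cur accs =
      if (':' : Char) ∈ l then
        accs.reverse ++ [cur.reverse ++ l.takeWhile (· ≠ ':'), (l.dropWhile (· ≠ ':')).tail]
      else accs.reverse ++ [cur.reverse ++ l] := by
  induction l with
  | nil =>
    intro fuel hf cur accs
    cases fuel with
    | zero => omega
    | succ f => simp [PySem.Chars.splitOnMax.go]
  | cons c rest ih =>
    intro fuel hf cur accs
    cases fuel with
    | zero => simp at hf
    | succ f =>
      by_cases hc : c = ':'
      · subst hc
        show PySem.Chars.splitOnMax.go [':'] (f+1) 1 (':' :: rest) cur accs = _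
        rw [show PySem.Chars.splitOnMax.go [':'] (f+1) 1 (':' :: rest) cur accs
            = PySem.Chars.splitOnMax.go [':'] f 0 (List.drop 1 (':' :: rest)) [] (cur.reverse :: accs) by
          simp [PySem.Chars.splitOnMax.go, List.isPrefixOf]]
        rw [List.drop_one, List.tail_cons, pq_go_zero]
        simp [List.takeWhile_cons, List.dropWhile_cons]
      · have hstep : PySem.Chars.splitOnMax.go [':'] (f+1) 1 (c :: rest) cur accs
            = PySem.Chars.splitOnMax.go [':'] f 1 rest (c :: cur) accs := by
          simp [PySem.Chars.splitOnMax.go, List.isPrefixOf, (by simpa using Ne.symm hc : (':' == c) = false)]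
        rw [hstep, ih f (by simpa using hf) (c :: cur) accs]
        have hcc : (':' = c) = False := by simp [Ne.symm hc]
        by_cases hr : (':' : Char) ∈ rest <;>
          simp [List.takeWhile_cons, List.dropWhile_cons, hc, hr, List.mem_cons, hcc]

theorem pq_splitMax_chars (cs : List Char) :
    PySem.Chars.splitMax? cs [':'] 1 =
      some (if (':' : Char) ∈ cs then [cs.takeWhile (· ≠ ':'), (cs.dropWhile (· ≠ ':')).tail] else [cs]) := by
  have h1 : PySem.Chars.splitMax? cs [':'] 1 = some (PySem.Chars.splitOnMax cs [':'] 1) := by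
    simp [PySem.Chars.splitMax?]
  rw [h1, PySem.Chars.splitOnMax, if_neg (by norm_num)]
  rw [show ((1 : Int).toNat) = 1 from rfl, pq_go_one cs (cs.length + 1) (by omega) [] []]
  split <;> simp

-- the key B extracts from a line whose stripped form contains ':'
theorem pq_key_toList (s : String) (h : (':' : Char) ∈ s.toList) :
    (((PySem.Str.splitMax? s ":" 1).getD []).getD 0 "").toList = s.toList.takeWhile (· ≠ ':') := by
  have hb := PySem.Str.splitMax?_map s ":" 1
  rw [show (":" : String).toList = [':'] from rfl, pq_splitMax_chars, if_pos h] at hb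
  cases hsp : PySem.Str.splitMax? s ":" 1 with
  | none => rw [hsp] at hb; simp at hb
  | some l =>
    rw [hsp] at hb
    simp only [Option.map_some, Option.some.injEq] at hb
    cases l with
    | nil => simp at hb
    | cons x t =>
      simp only [List.map_cons, List.cons.injEq] at hb
      simpa using hb.1

theorem pq_dropWhile_colon (cs : List Char) (h : (':' : Char) ∈ cs) :
    cs.dropWhile (· ≠ ':') = ':' :: (cs.dropWhile (· ≠ ':')).tail := by
  induction cs with
  | nil => simp at h
  | cons a tl ih =>
    by_cases ha : a = ':'
    · subst ha
      rw [List.dropWhile_cons, if_neg (by simp)]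
      rfl
    · have hb : (fun x => decide (x ≠ ':')) a = true := by simp [ha]
      rw [List.dropWhile_cons, if_pos hb]
      exact ih (by rcases List.mem_cons.mp h with hh | hh; exact absurd hh.symm ha; exact hh)

theorem pq_match_iff (k line : String) (hk : (':' : Char) ∉ k.toList) :
    pqMatches k line = true ↔
      (PySem.Str.isIn ":" (PySem.Str.strip line) = true ∧
        ((PySem.Str.splitMax? (PySem.Str.strip line) ":" 1).getD []).getD 0 "" = k) := by
  constructor
  · intro h
    have hin := pq_matches_isIn h
    have h' : (k.toList ++ [':']) <+: (PySem.Str.strip line).toList := by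
      simpa [pqMatches, PySem.Chars.startswith_iff] using h
    rcases h' with ⟨t, ht⟩
    have hcs : (PySem.Str.strip line).toList = k.toList ++ ':' :: t := by
      rw [← ht]; simp
    have hmem : (':' : Char) ∈ (PySem.Str.strip line).toList := by
      rw [hcs]; simp
    refine ⟨hin, ?_⟩
    apply String.toList_inj.mp
    rw [pq_key_toList _ hmem, hcs, (pq_takeWhile_colon k.toList t hk).1]
  · rintro ⟨hin, hkey⟩
    have hmem : (':' : Char) ∈ (PySem.Str.strip line).toList := by
      have : [':'] <:+: (PySem.Str.strip line).toList := by
        simpa [PySem.Str.isIn_eq, PySem.Chars.isIn_iff_infix] using hin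
      rcases this with ⟨a, b, hab⟩
      rw [← hab]; simp
    have htw : (PySem.Str.strip line).toList.takeWhile (· ≠ ':') = k.toList := by
      rw [← pq_key_toList _ hmem, hkey]
    set cs := (PySem.Str.strip line).toList with hcs
    have hsplit : cs = k.toList ++ ':' :: (cs.dropWhile (· ≠ ':')).tail := by
      have h1 := List.takeWhile_append_dropWhile (p := (· ≠ ':')) (l := cs)
      rw [htw] at h1
      calc cs = k.toList ++ cs.dropWhile (· ≠ ':') := h1.symm
        _ = k.toList ++ ':' :: (cs.dropWhile (· ≠ ':')).tail :=
          congrArg (k.toList ++ ·) (pq_dropWhile_colon cs hmem)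
    show PySem.Str.startswith (PySem.Str.strip line) (k ++ ":") = true
    rw [PySem.Str.startswith_eq]
    rw [PySem.Chars.startswith_iff]
    rw [show (k ++ ":").toList = k.toList ++ [':'] by simp]
    exact ⟨(cs.dropWhile (· ≠ ':')).tail, by rw [List.append_assoc, List.singleton_append]; exact hsplit.symm⟩

-- keys are unchanged by B's scan
theorem pqB_keys (lines : List String) : ∀ (st : PySem.Dict String String × PySem.Set String),
    (lines.foldl pqBStep st).1.keys = st.1.keys := by
  induction lines with
  | nil => intro st; rfl
  | cons line rest ih =>
    intro st
    rw [List.foldl_cons, ih]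
    unfold pqBStep
    dsimp only
    by_cases hin : PySem.Str.isIn ":" (PySem.Str.strip line) = true
    · rw [if_pos hin]
      by_cases hcond : (st.1.contains (((PySem.Str.splitMax? (PySem.Str.strip line) ":" 1).getD []).getD 0 "")
          && !(PySem.Set.contains st.2 (((PySem.Str.splitMax? (PySem.Str.strip line) ":" 1).getD []).getD 0 ""))) = true
      · rw [if_pos hcond]
        by_cases hq : (PySem.Str.startswith (PySem.Str.strip (((PySem.Str.splitMax? line ":" 1).getD []).getD 1 "")) "\"" &&
            PySem.Str.endswith (PySem.Str.strip (((PySem.Str.splitMax? line ":" 1).getD []).getD 1 "")) "\"") = true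
        · rw [if_pos hq]
          show (st.1.modify _ "" _).keys = st.1.keys
          rw [PySem.Dict.keys_modify,
            PySem.Dict.keys_insert_of_contains _ _
              (by simp only [Bool.and_eq_true] at hcond; exact hcond.1)]
        · rw [if_neg hq]
      · rw [if_neg hcond]
    · rw [if_neg hin]

-- the value B's scan leaves at a colon-free key that is present in the dict
-- the key B extracts never contains a colon
theorem pq_key_nocolon (s : String) (h : (':' : Char) ∈ s.toList) :
    (':' : Char) ∉ (((PySem.Str.splitMax? s ":" 1).getD []).getD 0 "").toList := by
  rw [pq_key_toList s h]
  intro hmem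
  have := List.mem_takeWhile_imp hmem
  simp at this

set_option maxHeartbeats 1600000 in
theorem pqB_getD (lines : List String) :
    ∀ (r : PySem.Dict String String) (seen : PySem.Set String) (k : String),
      ((':' : Char) ∉ k.toList ∨ ∀ l ∈ lines, pqMatches k l = false) → r.contains k = true →
      (lines.foldl pqBStep (r, seen)).1.getD k "" =
        if PySem.Set.contains seen k then r.getD k ""
        else if (pqFM k lines).getD false then "\"" ++ r.getD k "" ++ "\"" else r.getD k "" := by
  induction lines with
  | nil =>
    intro r seen k hk hc
    simp [pqFM]
  | cons line rest ih =>
    intro r seen k hk hc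
    rw [List.foldl_cons]
    by_cases hin : PySem.Str.isIn ":" (PySem.Str.strip line) = true
    · set key := ((PySem.Str.splitMax? (PySem.Str.strip line) ":" 1).getD []).getD 0 "" with hkeydef
      have hmemc : (':' : Char) ∈ (PySem.Str.strip line).toList := by
        have : [':'] <:+: (PySem.Str.strip line).toList := by
          simpa [PySem.Str.isIn_eq, PySem.Chars.isIn_iff_infix] using hin
        rcases this with ⟨a, b, hab⟩
        rw [← hab]; simp
      have hknc : (':' : Char) ∉ key.toList := pq_key_nocolon _ hmemc
      have hkr : (':' : Char) ∉ k.toList ∨ ∀ l ∈ rest, pqMatches k l = false :=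
        hk.imp id (fun h l hl => h l (List.mem_cons_of_mem line hl))
      by_cases hkeq : key = k
      · -- this line matches k
        have hkcf : (':' : Char) ∉ k.toList := hkeq ▸ hknc
        have hm : pqMatches k line = true := (pq_match_iff k line hkcf).mpr ⟨hin, hkeq⟩
        have hfm : pqFM k (line :: rest) = some (pqQOf line) := by rw [pqFM, if_pos hm]
        by_cases hseen : PySem.Set.contains seen k = true
        · have hstep : pqBStep (r, seen) line = (r, seen) := by
            unfold pqBStep
            dsimp only
            rw [if_pos hin]
            rw [← hkeydef, hkeq]
            rw [if_neg (by rw [hseen]; simp)]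
          rw [hstep, ih r seen k hkr hc, if_pos hseen, if_pos hseen]
        · have hcond : (r.contains key && !(PySem.Set.contains seen key)) = true := by
            have hns : PySem.Set.contains seen k = false := by
              cases h : PySem.Set.contains seen k
              · rfl
              · exact absurd h hseen
            rw [hkeq, hc, hns]
            rfl
          by_cases hq : pqQOf line = true
          · have hstep : pqBStep (r, seen) line
                = (r.modify key "" (fun v => "\"" ++ v ++ "\""), PySem.Set.add seen key) := by
              unfold pqBStep
              rw [if_pos hin]
              rw [← hkeydef, if_pos hcond]
              have hqq : (PySem.Str.startswith (PySem.Str.strip (((PySem.Str.splitMax? line ":" 1).getD []).getD 1 "")) "\"" &&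
                  PySem.Str.endswith (PySem.Str.strip (((PySem.Str.splitMax? line ":" 1).getD []).getD 1 "")) "\"") = true := by
                simpa [pqQOf] using hq
              rw [if_pos hqq]
            rw [hstep, ih _ _ k hkr (by rw [PySem.Dict.contains_modify]; simp [hc])]
            have hseen' : PySem.Set.contains (PySem.Set.add seen key) k = true := by
              simp [PySem.Set.mem_add, hkeq.symm]
            rw [if_pos hseen', if_neg hseen, hfm]
            simp only [hq, Option.getD_some, if_true]
            rw [hkeq, PySem.Dict.getD_modify_self]
          · have hstep : pqBStep (r, seen) line = (r, PySem.Set.add seen key) := by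
              unfold pqBStep
              rw [if_pos hin]
              rw [← hkeydef, if_pos hcond]
              have hqq : (PySem.Str.startswith (PySem.Str.strip (((PySem.Str.splitMax? line ":" 1).getD []).getD 1 "")) "\"" &&
                  PySem.Str.endswith (PySem.Str.strip (((PySem.Str.splitMax? line ":" 1).getD []).getD 1 "")) "\"") = false := by
                simpa [pqQOf] using hq
              rw [if_neg (by rw [hqq]; simp)]
            rw [hstep, ih _ _ k hkr hc]
            have hseen' : PySem.Set.contains (PySem.Set.add seen key) k = true := by
              simp [PySem.Set.mem_add, hkeq.symm]
            rw [if_pos hseen', if_neg hseen, hfm]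
            simp [hq]
      · -- this line does not match k
        have hm : pqMatches k line = false := by
          cases hmm : pqMatches k line with
          | false => rfl
          | true =>
            rcases hk with hkcf | hmf
            · exact absurd ((pq_match_iff k line hkcf).mp hmm).2 hkeq
            · exact absurd hmm (by rw [hmf line (List.mem_cons_self)]; simp)
        have hfm : pqFM k (line :: rest) = pqFM k rest := by rw [pqFM, if_neg (by simp [hm])]
        have hst : ((pqBStep (r, seen) line).1.getD k "" = r.getD k ""
              ∧ (pqBStep (r, seen) line).1.contains k = r.contains k)
              ∧ PySem.Set.contains (pqBStep (r, seen) line).2 k = PySem.Set.contains seen k := by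
          unfold pqBStep
          dsimp only
          rw [if_pos hin]
          simp only [← hkeydef]
          split
          · split
            · refine ⟨⟨?_, ?_⟩, ?_⟩
              · rw [PySem.Dict.getD_modify, if_neg (fun h => hkeq h.symm)]
              · have hne : ¬ k = key := fun h => hkeq h.symm
                rw [PySem.Dict.contains_modify]; simp [hne]
              · cases hsk : PySem.Set.contains seen k with
                | true => rw [PySem.Set.contains_iff] at hsk ⊢; rw [PySem.Set.mem_add]; left; exact hsk
                | false =>
                  rw [← Bool.not_eq_true] at hsk ⊢
                  rw [PySem.Set.contains_iff] at hsk ⊢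
                  rw [PySem.Set.mem_add]
                  rintro (h | h)
                  · exact hsk h
                  · exact hkeq h.symm
            · refine ⟨⟨rfl, rfl⟩, ?_⟩
              cases hsk : PySem.Set.contains seen k with
              | true => rw [PySem.Set.contains_iff] at hsk ⊢; rw [PySem.Set.mem_add]; left; exact hsk
              | false =>
                rw [← Bool.not_eq_true] at hsk ⊢
                rw [PySem.Set.contains_iff] at hsk ⊢
                rw [PySem.Set.mem_add]
                rintro (h | h)
                · exact hsk h
                · exact hkeq h.symm
          · exact ⟨⟨rfl, rfl⟩, rfl⟩
        obtain ⟨⟨hg, hcont⟩, hsn⟩ := hst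
        have := ih (pqBStep (r, seen) line).1 (pqBStep (r, seen) line).2 k hkr (by rw [hcont]; exact hc)
        rw [show (pqBStep (r, seen) line) = ((pqBStep (r, seen) line).1, (pqBStep (r, seen) line).2) from rfl] at this ⊢
        rw [this, hg, hsn, hfm]
    · have hstep : pqBStep (r, seen) line = (r, seen) := by
        unfold pqBStep
        rw [if_neg hin]
      have hm : pqMatches k line = false := by
        cases hmm : pqMatches k line with
        | false => rfl
        | true => exact absurd (pq_matches_isIn hmm) hin
      have hfm : pqFM k (line :: rest) = pqFM k rest := by rw [pqFM, if_neg (by simp [hm])]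
      rw [hstep, ih r seen k (hk.imp id (fun h l hl => h l (List.mem_cons_of_mem line hl))) hc, hfm]

theorem pq_mem_keys_ofList (l : List (String × String)) (k : String) :
    k ∈ (PySem.Dict.ofList l).keys ↔ k ∈ l.map Prod.fst := by
  show k ∈ (l.foldl (fun d p => d.insert p.1 p.2) PySem.Dict.empty).keys ↔ _
  rw [show (fun (d : PySem.Dict String String) (p : String × String) => d.insert p.1 p.2)
      = (fun d p => d.insert (Prod.fst p) ((fun (_ : PySem.Dict String String) (p : String × String) => p.2) d p)) from rfl]
  rw [PySem.Dict.keys_foldl_insert_key]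
  simp [PySem.Set.mem_ofList]

-- ===== VERDICT (by name: the statement is the Claim_ definition above) =====
set_option maxHeartbeats 1600000 in
theorem preserve_quoted_dict_items_spec : Claim_equal_preserve_quoted_dict_items := by
  intro item_dict lines _ hpre
  simp only [Spec_preserve_quoted_dict_items, preserve_quoted_dict_items,
    preserve_quoted_dict_items_alt]
  set d0 := PySem.Dict.ofList item_dict with hd0
  have hnd : d0.keys.Nodup := PySem.Dict.nodup_keys_ofList item_dict
  -- A's side: a fold of fresh inserts is a map over the items
  have hA : ((d0.items.foldl
      (fun result kv =>
        if pqIsQuoted kv.2 kv.1 lines then result.insert kv.1 ("\"" ++ kv.2 ++ "\"")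
        else result.insert kv.1 kv.2) PySem.Dict.empty)).items
      = d0.items.map (fun kv => (kv.1, if pqIsQuoted kv.2 kv.1 lines then "\"" ++ kv.2 ++ "\"" else kv.2)) := by
    rw [show (fun (result : PySem.Dict String String) (kv : String × String) =>
        if pqIsQuoted kv.2 kv.1 lines then result.insert kv.1 ("\"" ++ kv.2 ++ "\"")
        else result.insert kv.1 kv.2)
        = (fun result kv => result.insert kv.1
            (if pqIsQuoted kv.2 kv.1 lines then "\"" ++ kv.2 ++ "\"" else kv.2)) by
      funext result kv; split <;> rfl]
    rw [PySem.Dict.items_foldl_insert_fresh d0.items (fun kv => kv.1)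
      (fun kv => if pqIsQuoted kv.2 kv.1 lines then "\"" ++ kv.2 ++ "\"" else kv.2)
      PySem.Dict.empty (fun a _ => PySem.Dict.contains_empty a.1) hnd]
    rw [show (PySem.Dict.empty : PySem.Dict String String).items = [] from rfl, List.nil_append]
  rw [hA]
  -- B's side: items of the final dict, key by key
  have hkeys : (lines.foldl pqBStep (d0, PySem.Set.empty)).1.keys = d0.keys := pqB_keys lines _
  have hndB : (lines.foldl pqBStep (d0, PySem.Set.empty)).1.keys.Nodup := by rw [hkeys]; exact hnd
  rw [PySem.Dict.items_eq_map_keys _ hndB "", hkeys]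
  have hkeys_items : d0.keys = d0.items.map Prod.fst := rfl
  rw [hkeys_items, List.map_map]
  apply List.map_congr_left
  intro kv hkv
  have hmemk : kv.1 ∈ d0.keys := PySem.Dict.mem_keys_of_mem_items d0 hkv
  have hk : (':' : Char) ∉ kv.1.toList ∨ ∀ l ∈ lines, pqMatches kv.1 l = false := by
    by_cases hcol : (':' : Char) ∈ kv.1.toList
    · right
      intro l hl
      have := (pq_mem_keys_ofList item_dict kv.1).mp hmemk
      rcases List.mem_map.mp this with ⟨p, hp, hfst⟩
      have hnm := hpre p hp (by rw [hfst]; exact hcol) l hl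
      cases hmm : pqMatches kv.1 l with
      | false => rfl
      | true => exact absurd (by rw [← hfst] at hmm; exact hmm) hnm
    · left; exact hcol
  have hc : d0.contains kv.1 = true := (PySem.Dict.contains_iff_mem_keys d0 kv.1).mpr hmemk
  have hval := pqB_getD lines d0 PySem.Set.empty kv.1 hk hc
  have hempty : PySem.Set.contains (PySem.Set.empty : PySem.Set String) kv.1 = false := rfl
  rw [hempty] at hval
  simp only [if_false, Bool.false_eq_true] at hval
  have hgd : d0.getD kv.1 "" = kv.2 := PySem.Dict.getD_of_mem_items d0 hkv hnd ""
  simp only [Function.comp]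
  rw [hval, hgd, pqIsQuoted_eq_fm]
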